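-- pv_equiv track=rewrite | github.com/jtraub91/bits | src/bits/bips/bip380.py | descsum_expand
-- ===== SOURCE A (Python) =====
-- INPUT_CHARSET = "0123456789()[],'/*abcdefgh@:$%{}IJKLMNOPQRSTUVWXYZ&+-.;<=>?!^_|~ijklmnopqrstuvwxyzABCDEFGH`#\"\\ "
--
-- def descsum_expand(s):
--     """Internal function that does the character to symbol expansion"""
--     groups = []
--     symbols = []
--     for c in s:
--         if not c in INPUT_CHARSET:
--             return None
--         v = INPUT_CHARSET.find(c)
--         symbols.append(v & 31)
--         groups.append(v >> 5)
--         if len(groups) == 3: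
--             symbols.append(groups[0] * 9 + groups[1] * 3 + groups[2])
--             groups = []
--     if len(groups) == 1:
--         symbols.append(groups[0])
--     elif len(groups) == 2:
--         symbols.append(groups[0] * 3 + groups[1])
--     return symbols
-- ===== SOURCE B (Python) =====
-- INPUT_CHARSET = "0123456789()[],'/*abcdefgh@:$%{}IJKLMNOPQRSTUVWXYZ&+-.;<=>?!^_|~ijklmnopqrstuvwxyzABCDEFGH`#\"\\ "
--
--
-- def descsum_expand(s):
--     """Internal function that does the character to symbol expansion"""
--     table = {c: i for i, c in enumerate(INPUT_CHARSET)}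
--     idx = []
--     for c in s:
--         v = table.get(c)
--         if v is None:
--             return None
--         idx.append(v)
--     symbols = []
--     for i in range(0, len(idx), 3):
--         chunk = idx[i:i + 3]
--         for v in chunk:
--             symbols.append(v & 31)
--         gs = [v >> 5 for v in chunk]
--         if len(gs) == 3:
--             symbols.append(gs[0] * 9 + gs[1] * 3 + gs[2])
--         elif len(gs) == 2:
--             symbols.append(gs[0] * 3 + gs[1])
--         else:
--             symbols.append(gs[0])
--     return symbols
-- ===== Notes on version B (the rewrite author's own statement) =====
-- stated objective: alternative
-- what changed: B first maps every character to its charset index in a single validation pass (dict lookup, None on a missing char) and then walks that index list in explicit slices of 3, emitting the three low-5-bit symbols and the combined high-bit symbol per slice (g0*9+g1*3+g2, g0*3+g1, or g0 for a partial tail), replacing A's in-loop groups accumulator with its len==3 reset and A's per-character substring .find scan.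
import Mathlib
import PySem

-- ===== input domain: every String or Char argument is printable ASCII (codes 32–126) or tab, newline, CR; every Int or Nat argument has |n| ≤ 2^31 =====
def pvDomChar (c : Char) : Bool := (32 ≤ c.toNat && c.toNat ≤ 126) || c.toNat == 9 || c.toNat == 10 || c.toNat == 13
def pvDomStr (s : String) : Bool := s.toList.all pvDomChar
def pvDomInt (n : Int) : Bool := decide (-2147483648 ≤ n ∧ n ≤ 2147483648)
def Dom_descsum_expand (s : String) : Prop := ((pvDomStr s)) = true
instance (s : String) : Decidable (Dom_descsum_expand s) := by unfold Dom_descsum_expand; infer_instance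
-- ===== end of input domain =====

-- B replaces A's running groups-accumulator with a precomputed index table consumed in explicit
-- chunks of 3 (a different decomposition; objective: alternative, no speed claim).

def pvCharset : List Char := "0123456789()[],'/*abcdefgh@:$%{}IJKLMNOPQRSTUVWXYZ&+-.;<=>?!^_|~ijklmnopqrstuvwxyzABCDEFGH`#\"\\ ".toList

-- ===== PORT A =====
-- the per-character loop of A, state = (groups, symbols); after the loop the 1-/2-element tail
def pvLoopA : List Char → List Int → List Int → Option (List Int)
  | [], groups, symbols =>
      match groups with
      | [g0] => some (symbols ++ [g0])
      | [g0, g1] => some (symbols ++ [g0 * 3 + g1])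
      | _ => some symbols
  | c :: cs, groups, symbols =>
      if PySem.Chars.isIn [c] pvCharset = false then none
      else
        let v : Int := PySem.Chars.find pvCharset [c]
        let symbols' := symbols ++ [PySem.Int.band v 31]
        let groups' := groups ++ [v >>> 5]
        if groups'.length = 3 then
          pvLoopA cs []
            (symbols' ++ [PySem.List.pyGetD groups' 0 0 * 9 + PySem.List.pyGetD groups' 1 0 * 3
              + PySem.List.pyGetD groups' 2 0])
        else
          pvLoopA cs groups' symbols'

def descsum_expand (s : String) : Option (List Int) :=
  pvLoopA s.toList [] []

-- ===== PORT B =====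
-- {c: i for i, c in enumerate(INPUT_CHARSET)}
def pvTable : PySem.Dict Char Int :=
  PySem.Dict.ofList ((PySem.List.enumerate pvCharset).map (fun p => (p.2, p.1)))

-- first pass of B: map every character to its index, none if any is missing
def pvIdxList : List Char → Option (List Int)
  | [] => some []
  | c :: cs =>
      match pvTable.get? c with
      | none => none
      | some v => (pvIdxList cs).map (v :: ·)

-- second pass of B: consume the index list in slices of 3
def pvChunks : List Int → List Int
  | [] => []
  | [a] => [PySem.Int.band a 31, a >>> 5]
  | [a, b] => [PySem.Int.band a 31, PySem.Int.band b 31, (a >>> 5) * 3 + (b >>> 5)]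
  | a :: b :: c :: tl =>
      PySem.Int.band a 31 :: PySem.Int.band b 31 :: PySem.Int.band c 31
        :: ((a >>> 5) * 9 + (b >>> 5) * 3 + (c >>> 5)) :: pvChunks tl

def descsum_expand_alt (s : String) : Option (List Int) :=
  match pvIdxList s.toList with
  | none => none
  | some idx => some (pvChunks idx)

-- ===== PRECONDITION & SPEC =====
def Spec_descsum_expand (s : String) (out : Option (List Int)) : Prop := out = descsum_expand_alt s
instance (s : String) (out : Option (List Int)) : Decidable (Spec_descsum_expand s out) := by unfold Spec_descsum_expand; infer_instance

-- ===== CLAIM (what is proved, stated in full; the proofs are below) =====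
def Claim_equal_descsum_expand : Prop := ∀ (s : String), Dom_descsum_expand s → Spec_descsum_expand s (descsum_expand s)

-- ===== LEMMAS AND PROOFS =====

-- chunk processing generalised by A's pending groups (length ≤ 2)
def pvChunksAux : List Int → List Int → List Int
  | p, [] =>
      match p with
      | [g0] => [g0]
      | [g0, g1] => [g0 * 3 + g1]
      | _ => []
  | [g0, g1], a :: tl =>
      PySem.Int.band a 31 :: (g0 * 9 + g1 * 3 + (a >>> 5)) :: pvChunksAux [] tl
  | p, a :: tl => PySem.Int.band a 31 :: pvChunksAux (p ++ [a >>> 5]) tl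

set_option maxRecDepth 40000 in
theorem pvIdxList_nil : pvIdxList [] = some [] := rfl

set_option maxRecDepth 40000 in
theorem pvIdxList_cons (c : Char) (cs : List Char) :
    pvIdxList (c :: cs) = match pvTable.get? c with
      | none => none
      | some v => (pvIdxList cs).map (v :: ·) := rfl

-- per-character bridge, finite check over all 127 relevant code points
set_option maxRecDepth 8192 in
theorem pvBridgeFin : ∀ n : Fin 127, pvDomChar (Char.ofNat n.1) = true →
    (if PySem.Chars.isIn [Char.ofNat n.1] pvCharset then
        some (PySem.Chars.find pvCharset [Char.ofNat n.1]) else none)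
      = pvTable.get? (Char.ofNat n.1) := by decide

theorem pvBridge (c : Char) (h : pvDomChar c = true) :
    (if PySem.Chars.isIn [c] pvCharset then some (PySem.Chars.find pvCharset [c]) else none)
      = pvTable.get? c := by
  have hlt : c.toNat < 127 := by
    simp [pvDomChar] at h
    omega
  have := pvBridgeFin ⟨c.toNat, hlt⟩
  rw [Char.ofNat_toNat] at this
  exact this h

theorem pvChunks_eq_aux : ∀ l : List Int, pvChunks l = pvChunksAux [] l := by
  intro l
  induction l using pvChunks.induct with
  | case1 => rfl
  | case2 a => rfl
  | case3 a b => rfl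
  | case4 a b c tl ih => simp [pvChunks, pvChunksAux, ih]

set_option maxRecDepth 8192 in
theorem pvLoopA_eq : ∀ (cs : List Char) (p symbols : List Int),
    cs.all pvDomChar = true →
    (p = [] ∨ (∃ g, p = [g]) ∨ (∃ g h, p = [g, h])) →
    pvLoopA cs p symbols = (pvIdxList cs).map (fun l => symbols ++ pvChunksAux p l) := by
  intro cs
  induction cs with
  | nil =>
      intro p symbols _ hp
      rcases hp with rfl | ⟨g, rfl⟩ | ⟨g, h, rfl⟩ <;>
        rw [pvIdxList_nil] <;> simp [pvLoopA, pvChunksAux]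
  | cons c cs ih =>
      intro p symbols hall hp
      rw [List.all_cons, Bool.and_eq_true] at hall
      have hc : pvDomChar c = true := hall.1
      have hall' : cs.all pvDomChar = true := hall.2
      have hb := pvBridge c hc
      rw [pvIdxList_cons]
      cases hg : pvTable.get? c with
      | none =>
          rw [hg] at hb
          cases hX : PySem.Chars.isIn [c] pvCharset with
          | true => simp [hX] at hb
          | false => simp [pvLoopA, hX]
      | some v =>
          rw [hg] at hb
          cases hX : PySem.Chars.isIn [c] pvCharset with
          | false => simp [hX] at hb
          | true =>
              have hv : PySem.Chars.find pvCharset [c] = v := by simpa [hX] using hb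
              rcases hp with rfl | ⟨g, rfl⟩ | ⟨g, h, rfl⟩
              · simp only [pvLoopA, hX, hv]
                rw [if_neg (by decide : ¬(true = false)), if_neg (by simp)]
                rw [ih ([] ++ [v >>> 5]) _ hall' (Or.inr (Or.inl ⟨v >>> 5, by simp⟩))]
                cases pvIdxList cs <;> simp [pvChunksAux]
              · simp only [pvLoopA, hX, hv]
                rw [if_neg (by decide : ¬(true = false)), if_neg (by simp)]
                rw [ih ([g] ++ [v >>> 5]) _ hall' (Or.inr (Or.inr ⟨g, v >>> 5, by simp⟩))]
                cases pvIdxList cs <;> simp [pvChunksAux]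
              · simp only [pvLoopA, hX, hv]
                rw [if_neg (by decide : ¬(true = false)), if_pos (by simp)]
                rw [ih [] _ hall' (Or.inl rfl)]
                cases pvIdxList cs <;>
                  simp [pvChunksAux, PySem.List.pyGetD, PySem.List.pyGet?, PySem.List.pyIdx?]

-- ===== VERDICT (by name: the statement is the Claim_ definition above) =====
set_option maxRecDepth 40000 in
theorem descsum_expand_spec : Claim_equal_descsum_expand := by
  intro s hdom
  unfold Spec_descsum_expand descsum_expand descsum_expand_alt
  rw [pvLoopA_eq s.toList [] [] hdom (Or.inl rfl)]
  cases pvIdxList s.toList <;> simp [pvChunks_eq_aux]
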